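-- pv_equiv track=rewrite | github.com/DaiseyCode/LocalCalibrationPubExps | localizing/probe/heuristic_vec_gather.py | _compute_nesting_levels
-- ===== SOURCE A (Python) =====
-- from typing import Dict, List, Set, Optional, Tuple
--
-- def _compute_nesting_levels(tokens: List[str]) -> List[int]:
--     """Efficiently compute nesting levels for all tokens in O(n)."""
--     nesting_levels = []
--     current_nesting = 0
--
--     open_brackets = {'(', '[', '{'}
--     close_brackets = {')', ']', '}'}
--
--     for token in tokens:
--         nesting_levels.append(current_nesting)
--
--         if token in open_brackets:
--             current_nesting += 1
--         elif token in close_brackets: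
--             current_nesting = max(0, current_nesting - 1)
--
--     return nesting_levels
-- ===== SOURCE B (Python) =====
-- from itertools import accumulate
-- from typing import List
--
-- def _compute_nesting_levels(tokens: List[str]) -> List[int]:
--     """Closed-form via unclamped prefix sums: the clamped level before token i equals
--     p_i - min_{0<=j<=i} p_j, where p is the running sum of bracket deltas (p_0 = 0).
--     No clamping recurrence: two plain scans plus a pointwise subtraction."""
--     open_brackets = {'(', '[', '{'}
--     close_brackets = {')', ']', '}'}
--     deltas = [1 if t in open_brackets else -1 if t in close_brackets else 0
--               for t in tokens]
--     p = list(accumulate(deltas, initial=0))   # unclamped prefix sums, length n+1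
--     m = list(accumulate(p, min))              # running minimum of p
--     return [a - b for a, b in zip(p, m)][:len(tokens)]
-- ===== Notes on version B (the rewrite author's own statement) =====
-- stated objective: alternative
-- what changed: Replaced the clamped accumulator recurrence by a closed form: unclamped prefix sums of bracket deltas plus a running minimum, with level_i = p_i - min_{j<=i} p_j (pointwise subtraction), so no max-clamp appears in any loop.
import Mathlib
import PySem

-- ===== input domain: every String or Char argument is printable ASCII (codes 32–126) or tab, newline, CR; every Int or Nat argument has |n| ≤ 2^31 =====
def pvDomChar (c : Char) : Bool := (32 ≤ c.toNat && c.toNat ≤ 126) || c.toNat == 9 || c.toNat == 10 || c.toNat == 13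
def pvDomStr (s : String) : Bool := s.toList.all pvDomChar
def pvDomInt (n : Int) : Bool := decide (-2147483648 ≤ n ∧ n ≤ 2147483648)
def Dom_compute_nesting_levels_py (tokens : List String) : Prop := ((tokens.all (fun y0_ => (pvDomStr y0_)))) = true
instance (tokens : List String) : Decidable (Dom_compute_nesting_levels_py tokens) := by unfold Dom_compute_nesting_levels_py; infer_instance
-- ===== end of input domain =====

-- B replaces A's clamped accumulator loop by a closed form: unclamped prefix sums of the
-- bracket deltas, a running minimum, and a pointwise subtraction (level_i = p_i - min_{j≤i} p_j);
-- objective: alternative algorithm, same O(n) cost.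

-- ===== PORT A =====
-- the loop of A: state = (nesting_levels, current_nesting)
def pvLoopA : List String → List Int → Int → List Int
  | [], levels, _ => levels
  | t :: ts, levels, cur =>
    if t ∈ (["(", "[", "{"] : List String) then pvLoopA ts (levels ++ [cur]) (cur + 1)
    else if t ∈ ([")", "]", "}"] : List String) then pvLoopA ts (levels ++ [cur]) (max 0 (cur - 1))
    else pvLoopA ts (levels ++ [cur]) cur

def compute_nesting_levels_py (tokens : List String) : List Int := pvLoopA tokens [] 0

-- ===== PORT B =====
-- classify pass: +1 for an opening bracket, -1 for a closing bracket, 0 otherwise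
def pvDelta (t : String) : Int :=
  if t = "(" ∨ t = "[" ∨ t = "{" then 1
  else if t = ")" ∨ t = "]" ∨ t = "}" then -1
  else 0

-- accumulate(deltas, initial=acc): unclamped prefix sums, n+1 elements
def pvPrefix : Int → List Int → List Int
  | acc, [] => [acc]
  | acc, d :: ds => acc :: pvPrefix (acc + d) ds

-- accumulate(p, min) after its first element: running minimum carried in the accumulator
def pvRunMinAux : Int → List Int → List Int
  | _, [] => []
  | acc, x :: xs => min acc x :: pvRunMinAux (min acc x) xs

-- accumulate(p, min): running minimum, same length as p
def pvRunMin : List Int → List Int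
  | [] => []
  | x :: xs => x :: pvRunMinAux x xs

def compute_nesting_levels_py_alt (tokens : List String) : List Int :=
  let p := pvPrefix 0 (tokens.map pvDelta)
  let m := pvRunMin p
  ((p.zip m).map (fun ab => ab.1 - ab.2)).take tokens.length

-- ===== PRECONDITION & SPEC =====
def Spec_compute_nesting_levels_py (tokens : List String) (out : List Int) : Prop := out = compute_nesting_levels_py_alt tokens
instance (tokens : List String) (out : List Int) : Decidable (Spec_compute_nesting_levels_py tokens out) := by unfold Spec_compute_nesting_levels_py; infer_instance

-- ===== CLAIM (what is proved, stated in full; the proofs are below) =====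
def Claim_equal_compute_nesting_levels_py : Prop := ∀ (tokens : List String), Dom_compute_nesting_levels_py tokens → Spec_compute_nesting_levels_py tokens (compute_nesting_levels_py tokens)

-- ===== LEMMAS AND PROOFS =====

-- proof-layer bridge: the clamped scan both sides are compared against
def pvClampScan : Int → List Int → List Int
  | acc, [] => [acc]
  | acc, d :: ds => acc :: pvClampScan (max 0 (acc + d)) ds

theorem pvClampScan_ne_nil (acc : Int) (ds : List Int) : pvClampScan acc ds ≠ [] := by
  cases ds <;> simp [pvClampScan]

theorem pvClampScan_length (acc : Int) (ds : List Int) :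
    (pvClampScan acc ds).length = ds.length + 1 := by
  induction ds generalizing acc with
  | nil => simp [pvClampScan]
  | cons d ds ih => simp [pvClampScan, ih]

-- A's loop is the clamped scan without its last state
theorem pvLoopA_eq (ts : List String) : ∀ (levels : List Int) (cur : Int), 0 ≤ cur →
    pvLoopA ts levels cur = levels ++ (pvClampScan cur (ts.map pvDelta)).dropLast := by
  induction ts with
  | nil => intro levels cur _; simp [pvLoopA, pvClampScan]
  | cons t ts ih =>
    intro levels cur hcur
    by_cases ho : t ∈ (["(", "[", "{"] : List String)
    · have hd : pvDelta t = 1 := by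
        simp only [List.mem_cons, List.not_mem_nil, or_false] at ho
        simp [pvDelta, ho]
      rw [show pvLoopA (t :: ts) levels cur = pvLoopA ts (levels ++ [cur]) (cur + 1) by
            simp [pvLoopA, ho]]
      rw [ih _ _ (by omega)]
      have hm : max 0 (cur + 1) = cur + 1 := by omega
      simp [List.map_cons, hd, pvClampScan, hm,
        List.dropLast_cons_of_ne_nil (pvClampScan_ne_nil _ _)]
    · by_cases hc : t ∈ ([")", "]", "}"] : List String)
      · have hd : pvDelta t = -1 := by
          simp only [List.mem_cons, List.not_mem_nil, or_false] at ho hc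
          rcases hc with h | h | h <;> simp [pvDelta, h]
        rw [show pvLoopA (t :: ts) levels cur = pvLoopA ts (levels ++ [cur]) (max 0 (cur - 1)) by
              simp [pvLoopA, ho, hc]]
        rw [ih _ _ (by omega)]
        have hm : cur + -1 = cur - 1 := by ring
        simp [List.map_cons, hd, pvClampScan, hm,
          List.dropLast_cons_of_ne_nil (pvClampScan_ne_nil _ _)]
      · have hd : pvDelta t = 0 := by
          simp only [List.mem_cons, List.not_mem_nil, or_false] at ho hc
          simp [pvDelta, ho, hc]
        rw [show pvLoopA (t :: ts) levels cur = pvLoopA ts (levels ++ [cur]) cur by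
              simp [pvLoopA, ho, hc]]
        rw [ih _ _ hcur]
        have hm : max 0 cur = cur := by omega
        simp [List.map_cons, hd, pvClampScan, hm,
          List.dropLast_cons_of_ne_nil (pvClampScan_ne_nil _ _)]

-- core identity: prefix sums minus their running minimum = the clamped scan
theorem pvSub_aux (ds : List Int) : ∀ (s macc : Int),
    ((pvPrefix s ds).zip (pvRunMinAux macc (pvPrefix s ds))).map (fun ab => ab.1 - ab.2)
      = pvClampScan (s - min macc s) ds := by
  induction ds with
  | nil => intro s macc; simp [pvPrefix, pvRunMinAux, pvClampScan]
  | cons d ds ih =>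
    intro s macc
    have h : (s + d) - min (min macc s) (s + d) = max 0 ((s - min macc s) + d) := by omega
    simp only [pvPrefix, pvRunMinAux, List.zip_cons_cons, List.map_cons]
    rw [ih (s + d) (min macc s), h]
    simp [pvClampScan]

theorem pvSub_eq (ds : List Int) :
    (((pvPrefix 0 ds).zip (pvRunMin (pvPrefix 0 ds))).map (fun ab => ab.1 - ab.2))
      = pvClampScan 0 ds := by
  cases ds with
  | nil => simp [pvPrefix, pvRunMin, pvClampScan]
  | cons d ds =>
    have h0 : ((0 : Int) + d) - min 0 (0 + d) = max 0 (0 + d) := by omega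
    simp only [pvPrefix, pvRunMin, List.zip_cons_cons, List.map_cons]
    rw [pvSub_aux ds (0 + d) 0, h0]
    simp [pvClampScan]

-- ===== VERDICT (by name: the statement is the Claim_ definition above) =====
theorem compute_nesting_levels_py_spec : Claim_equal_compute_nesting_levels_py := by
  intro tokens _
  unfold Spec_compute_nesting_levels_py compute_nesting_levels_py compute_nesting_levels_py_alt
  rw [pvLoopA_eq tokens [] 0 le_rfl]
  simp only [List.nil_append, pvSub_eq]
  rw [List.dropLast_eq_take]
  congr 1
  rw [pvClampScan_length]
  simp
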